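-- pv_equiv track=rewrite | github.com/ChanchalKumarMaji/CodeForces | 1332C.py | solve
-- ===== SOURCE A (Python) =====
-- def solve(s, k):
--     n = len(s)
--     r = n//k
--     res = 0
--     for j in range(k//2):
--         d = [0] * 26
--         for i in range(r):
--             d[ord(s[i*k+j]) - 97] += 1
--             d[ord(s[i*k+k-1-j]) - 97] += 1
--         res += 2*r - max(d)
--     if k%2 == 1:
--         d = [0] * 26
--         for i in range(r):
--             d[ord(s[i*k+k//2]) - 97] += 1
--         res += r - max(d)
--     return res
-- ===== SOURCE B (Python) =====
-- def solve(s, k):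
--     r = len(s) // k
--     res = r * k
--     for g in range((k + 1) // 2):
--         block = [s[i * k + g] for i in range(r)]
--         if g != k - 1 - g:
--             block += [s[i * k + k - 1 - g] for i in range(r)]
--         block = sorted(block)
--         best = 0
--         run = 0
--         prev = None
--         for c in block:
--             run = run + 1 if c == prev else 1
--             if run > best:
--                 best = run
--             prev = c
--         res -= best
--     return res
-- ===== Notes on version B (the rewrite author's own statement) =====
-- stated objective: alternative
-- what changed: Replaces A's per-group frequency tabulation (a 26-slot count array rebuilt and max-scanned per column pair, plus a separate odd-middle branch) by a sort-based method: each group's characters are collected, SORTED, and the most common character's multiplicity is found as the longest run of equal adjacent elements in one scan -- no count table of any kind is built; the odd middle column is just the group whose two columns coincide.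
-- outside the precondition, e.g. on solve('Ga', 1): A returns 0, B returns 1; on solve('ab', -1): A returns -2, B returns 2
import Mathlib
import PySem

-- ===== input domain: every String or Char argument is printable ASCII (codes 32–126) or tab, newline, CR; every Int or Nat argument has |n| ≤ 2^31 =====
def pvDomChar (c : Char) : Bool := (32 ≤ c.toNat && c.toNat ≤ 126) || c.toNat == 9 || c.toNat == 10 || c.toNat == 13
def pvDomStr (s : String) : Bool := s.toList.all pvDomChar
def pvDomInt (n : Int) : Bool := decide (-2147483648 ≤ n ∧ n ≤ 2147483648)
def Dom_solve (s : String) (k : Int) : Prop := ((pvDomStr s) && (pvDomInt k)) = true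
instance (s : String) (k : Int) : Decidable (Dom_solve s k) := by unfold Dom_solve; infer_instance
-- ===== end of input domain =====

-- B replaces A's per-group 26-array frequency tabulation by a sort-based method: each group's
-- characters are sorted and the top multiplicity is read off as the longest run of equal
-- adjacent elements in one scan; the odd middle column is the group whose two columns coincide.


-- ===== PORT A =====
-- literal port of A; d has 26 entries, so Python's max(d) never raises and is ported as maxD _ _ 0
def solve (s : String) (k : Int) : Int :=
  let cs := s.toList
  let n : Int := PySem.List.len cs
  let r := PySem.Int.floordiv n k
  let res : Int :=
    (PySem.List.pyRange 0 (PySem.Int.floordiv k 2)).foldl (fun res j =>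
      let d : List Int :=
        (PySem.List.pyRange 0 r).foldl (fun d i =>
          let i1 : Int := ((PySem.List.pyGetD cs (i*k+j) 'a').toNat : Int) - 97
          let d := PySem.List.pySetD d i1 (PySem.List.pyGetD d i1 0 + 1)
          let i2 : Int := ((PySem.List.pyGetD cs (i*k+k-1-j) 'a').toNat : Int) - 97
          PySem.List.pySetD d i2 (PySem.List.pyGetD d i2 0 + 1))
          (PySem.List.pyRepeat [(0 : Int)] 26)
      res + (2*r - PySem.List.maxD d (fun x => x) 0)) 0
  if PySem.Int.mod k 2 = 1 then
    let d : List Int :=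
      (PySem.List.pyRange 0 r).foldl (fun d i =>
        let i1 : Int := ((PySem.List.pyGetD cs (i*k + PySem.Int.floordiv k 2) 'a').toNat : Int) - 97
        PySem.List.pySetD d i1 (PySem.List.pyGetD d i1 0 + 1))
        (PySem.List.pyRepeat [(0 : Int)] 26)
    res + (r - PySem.List.maxD d (fun x => x) 0)
  else res

-- ===== PORT B =====
-- literal port of Source B: collect a group's two columns, sort, take the longest equal run
def solve_alt (s : String) (k : Int) : Int :=
  let cs := s.toList
  let r := PySem.Int.floordiv (PySem.List.len cs) k
  (PySem.List.pyRange 0 (PySem.Int.floordiv (k+1) 2)).foldl (fun res g =>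
    let block := (PySem.List.pyRange 0 r).map (fun i => PySem.List.pyGetD cs (i*k+g) 'a')
    let block :=
      if g ≠ k - 1 - g then
        block ++ (PySem.List.pyRange 0 r).map (fun i => PySem.List.pyGetD cs (i*k+k-1-g) 'a')
      else block
    let block := PySem.List.sorted block (fun c => c) false
    let st := block.foldl (fun (st : Int × Int × Option Char) c =>
        let run : Int := if some c == st.2.2 then st.2.1 + 1 else 1
        let best : Int := if run > st.1 then run else st.1
        (best, run, some c)) ((0 : Int), (0 : Int), (none : Option Char))
    res - st.1) (r * k)

-- ===== PRECONDITION & SPEC =====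
-- Pre_ restricts to the problem's natural domain: k ≥ 1 and the scanned prefix s[:n//k*k] all
-- lowercase a–z.  Outside it A either raises (k = 0, or a scanned char below 'G' or above 'z'
-- gives IndexError on the 26-array) or returns accidental values (scanned chars 'G'–'`' are
-- merged into the letter counts by negative-index wraparound; k < 0 returns leftover loop state).
def Pre_solve (s : String) (k : Int) : Prop :=
  1 ≤ k ∧ ((s.toList.take (s.toList.length / k.toNat * k.toNat)).all
      (fun c => 97 ≤ c.toNat && c.toNat ≤ 122)) = true
instance (s : String) (k : Int) : Decidable (Pre_solve s k) := by unfold Pre_solve; infer_instance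
def pvWitness_solve : String × Int := ("abcbab", 3)
def Spec_solve (s : String) (k : Int) (out : Int) : Prop := out = solve_alt s k
instance (s : String) (k : Int) (out : Int) : Decidable (Spec_solve s k out) := by unfold Spec_solve; infer_instance

-- ===== CLAIM (what is proved, stated in full; the proofs are below) =====
def Claim_equal_solve : Prop := ∀ (s : String) (k : Int), Dom_solve s k → Pre_solve s k → Spec_solve s k (solve s k)

-- ===== LEMMAS AND PROOFS =====
-- increment step on the 26-array (A side)
def pvIncr (d : List Int) (i : Int) : List Int :=
  PySem.List.pySetD d i (PySem.List.pyGetD d i 0 + 1)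

theorem pvIncr_length (d : List Int) (i : Int) : (pvIncr d i).length = d.length := by
  simp [pvIncr, PySem.List.length_pySetD]

theorem pvFoldDouble {α : Type} (l : List α) (f g : α → Int) (d : List Int) :
    l.foldl (fun d x => pvIncr (pvIncr d (f x)) (g x)) d
      = (l.flatMap (fun x => [f x, g x])).foldl pvIncr d := by
  induction l generalizing d with
  | nil => rfl
  | cons x t ih => simp [List.flatMap_cons, ih]

theorem pvIncrFold_length (xs : List Int) (d : List Int) :
    (xs.foldl pvIncr d).length = d.length := by
  induction xs generalizing d with
  | nil => rfl
  | cons i t ih => simp [ih, pvIncr_length]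

theorem pvIncrFold_getD (xs : List Int) (d : List Int) (m : Nat) (hm : m < d.length)
    (hx : ∀ i ∈ xs, 0 ≤ i ∧ i < (d.length : Int)) :
    PySem.List.pyGetD (xs.foldl pvIncr d) (m : Int) 0
      = PySem.List.pyGetD d (m : Int) 0 + (xs.count (m : Int) : Int) := by
  induction xs generalizing d with
  | nil => simp
  | cons i t ih =>
    have hi := hx i (by simp)
    obtain ⟨j, hj⟩ : ∃ j : Nat, i = (j : Int) := ⟨i.toNat, by omega⟩
    subst hj
    have hlen : (pvIncr d j).length = d.length := pvIncr_length d j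
    rw [List.foldl_cons, ih (pvIncr d (j:Int)) (by omega) (by intro a ha; rw [hlen]; exact hx a (by simp [ha]))]
    have hget : PySem.List.pyGetD (pvIncr d (j:Int)) (m : Int) 0
        = if m = j then PySem.List.pyGetD d (m : Int) 0 + 1 else PySem.List.pyGetD d (m : Int) 0 := by
      unfold pvIncr
      rw [PySem.List.pyGetD_pySetD_natCast d j m _ 0 (by omega)]
      by_cases h : m = j
      · subst h; simp
      · simp [h]
    rw [hget, List.count_cons]
    by_cases h : m = j
    · subst h; simp; ring
    · have h2 : ¬ ((j:Int) = (m:Int)) := by omega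
      simp [h, h2]

-- character lists the two programs tally (A: interleaved pair rows / middle column; B: column blocks)
def pvCh (cs : List Char) (p : Nat) : Char := cs.getD p 'a'
def pvCol (cs : List Char) (K r c0 : Nat) : List Char :=
  (List.range r).map (fun i => pvCh cs (i*K+c0))
def pvLA (cs : List Char) (K r j : Nat) : List Char :=
  (List.range r).flatMap (fun i => [pvCh cs (i*K+j), pvCh cs (i*K+(K-1-j))])
def pvLM (cs : List Char) (K r : Nat) : List Char := pvCol cs K r (K/2)
def pvBlk (cs : List Char) (K r g : Nat) : List Char :=
  if g = K-1-g then pvCol cs K r g else pvCol cs K r g ++ pvCol cs K r (K-1-g)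

-- list-range sums as Finset sums
theorem pvCountP_range (n : Nat) (p : Nat → Bool) :
    (List.range n).countP p = ∑ i ∈ Finset.range n, if p i then 1 else 0 := by
  induction n with
  | zero => simp
  | succ n ih => rw [List.range_succ, List.countP_append, Finset.sum_range_succ, ih]; simp [List.countP_cons]

theorem pvSum_range (n : Nat) (f : Nat → Nat) :
    ((List.range n).map f).sum = ∑ i ∈ Finset.range n, f i := by
  induction n with
  | zero => simp
  | succ n ih => rw [List.range_succ, List.map_append, List.sum_append, Finset.sum_range_succ, ih]; simp

theorem pvSum_range_int (n : Nat) (f : Nat → Int) :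
    ((List.range n).map f).sum = ∑ i ∈ Finset.range n, f i := by
  induction n with
  | zero => simp
  | succ n ih => rw [List.range_succ, List.map_append, List.sum_append, Finset.sum_range_succ, ih]; simp

theorem pvCount_col (cs : List Char) (K r c0 : Nat) (c : Char) :
    (pvCol cs K r c0).count c
      = ∑ i ∈ Finset.range r, (if decide (pvCh cs (i*K+c0) = c) then 1 else 0) := by
  unfold pvCol
  rw [List.count_eq_countP, List.countP_map, pvCountP_range]
  apply Finset.sum_congr rfl
  intro i _
  simp [beq_iff_eq]

theorem pvCount_LA (cs : List Char) (K r j : Nat) (c : Char) :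
    (pvLA cs K r j).count c
      = ∑ i ∈ Finset.range r,
          ((if decide (pvCh cs (i*K+j) = c) then 1 else 0)
           + (if decide (pvCh cs (i*K+(K-1-j)) = c) then 1 else 0)) := by
  unfold pvLA
  rw [List.count_flatMap,
      pvSum_range r (List.count c ∘ fun i => [pvCh cs (i*K+j), pvCh cs (i*K+(K-1-j))])]
  simp only [Function.comp_apply]
  apply Finset.sum_congr rfl
  intro i _
  simp only [List.count_cons, List.count_nil, beq_iff_eq]
  by_cases h1 : pvCh cs (i*K+j) = c <;> by_cases h2 : pvCh cs (i*K+(K-1-j)) = c <;> simp [h1, h2]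

theorem pvCount_blk_pair (cs : List Char) (K r j : Nat) (hne : j ≠ K-1-j) (c : Char) :
    (pvBlk cs K r j).count c = (pvLA cs K r j).count c := by
  unfold pvBlk
  rw [if_neg hne, List.count_append, pvCount_col, pvCount_col, pvCount_LA, ← Finset.sum_add_distrib]

-- Python's max over two nonempty integer lists agrees when each dominates the other
theorem pvMaxD_eq (xs ys : List Int) (hx : xs ≠ []) (hy : ys ≠ [])
    (h1 : ∀ x ∈ xs, ∃ y ∈ ys, x ≤ y) (h2 : ∀ y ∈ ys, ∃ x ∈ xs, y ≤ x) :
    PySem.List.maxD xs (fun x => x) 0 = PySem.List.maxD ys (fun x => x) 0 := by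
  rcases hmx : PySem.List.max? xs (fun x => x) with _ | mx
  · exact absurd ((PySem.List.max?_eq_none_iff xs _).mp hmx) hx
  rcases hmy : PySem.List.max? ys (fun x => x) with _ | my
  · exact absurd ((PySem.List.max?_eq_none_iff ys _).mp hmy) hy
  have hmem_x := PySem.List.max?_mem hmx
  have hmem_y := PySem.List.max?_mem hmy
  obtain ⟨y, hy1, hy2⟩ := h1 mx hmem_x
  obtain ⟨x, hx1, hx2⟩ := h2 my hmem_y
  have b1 : mx ≤ my := le_trans hy2 (PySem.List.max?_isMax hmy y hy1)
  have b2 : my ≤ mx := le_trans hx2 (PySem.List.max?_isMax hmx x hx1)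
  simp [PySem.List.maxD, hmx, hmy]
  omega

theorem pvCharBack (c : Char) (h1 : 'a' ≤ c) (h2 : c ≤ 'z') :
    c.toNat - 97 < 26 ∧ Char.ofNat (97 + (c.toNat - 97)) = c := by
  have h1' : 97 ≤ c.toNat := h1
  have h2' : c.toNat ≤ 122 := h2
  refine ⟨by omega, ?_⟩
  have h : 97 + (c.toNat - 97) = c.toNat := by omega
  rw [h, Char.ofNat_toNat]

theorem pvCharOf_toNat (m : Nat) (h : m < 26) : (Char.ofNat (97+m)).toNat = 97+m := by
  have hv : (97+m).isValidChar := by unfold Nat.isValidChar; omega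
  simp [Char.toNat_ofNat, hv]

-- the 26-array's max equals the counter's max, for count-equal multisets L1 (A's) and L2 (B's, nonempty lowercase)
theorem pvMax_eq (L1 L2 : List Char) (hne : L2 ≠ []) (hlc : ∀ c ∈ L2, 'a' ≤ c ∧ c ≤ 'z')
    (hcnt : ∀ c, L1.count c = L2.count c) :
    PySem.List.maxD ((List.range 26).map (fun m => ((L1.count (Char.ofNat (97+m)) : Nat) : Int))) (fun x => x) 0
      = PySem.List.maxD ((PySem.Set.ofList L2).map (fun c => ((L2.count c : Nat) : Int))) (fun x => x) 0 := by
  obtain ⟨c0, hc0⟩ : ∃ c0, c0 ∈ L2 := by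
    cases L2 with
    | nil => exact absurd rfl hne
    | cons a t => exact ⟨a, by simp⟩
  apply pvMaxD_eq
  · simp [List.range_succ]
  · simp
    intro h
    have : c0 ∈ PySem.Set.ofList L2 := (PySem.Set.mem_ofList L2 c0).mpr hc0
    rw [h] at this
    simp at this
  · intro x hx
    simp at hx
    obtain ⟨m, hm, hxv⟩ := hx
    rw [hcnt] at hxv
    by_cases hz : L2.count (Char.ofNat (97+m)) = 0
    · exact ⟨(L2.count c0 : Int), by simp; exact ⟨c0, hc0, rfl⟩, by omega⟩
    · have hmem : Char.ofNat (97+m) ∈ L2 := List.count_pos_iff.mp (by omega)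
      refine ⟨x, ?_, le_refl x⟩
      simp
      exact ⟨Char.ofNat (97+m), hmem, hxv⟩
  · intro y hy
    simp at hy
    obtain ⟨c, hc, hyv⟩ := hy
    obtain ⟨hlt, hback⟩ := pvCharBack c (hlc c hc).1 (hlc c hc).2
    refine ⟨y, ?_, le_refl y⟩
    simp
    refine ⟨c.toNat - 97, hlt, ?_⟩
    rw [hback, hcnt]
    exact hyv

-- the 26-array built by the increment loop, as an explicit table of counts
theorem pvArr_eq_map (xs : List Int) (hx : ∀ i ∈ xs, 0 ≤ i ∧ i < 26) :
    xs.foldl pvIncr (List.replicate 26 (0:Int))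
      = (List.range 26).map (fun m => ((xs.count ((m:Nat) : Int) : Nat) : Int)) := by
  have hlen : (xs.foldl pvIncr (List.replicate 26 (0:Int))).length = 26 := by
    rw [pvIncrFold_length]; exact List.length_replicate
  apply List.ext_getElem
  · rw [hlen]; simp only [List.length_map, List.length_range]
  intro m hm1 hm2
  rw [hlen] at hm1
  have hget : (xs.foldl pvIncr (List.replicate 26 (0:Int)))[m] =
      PySem.List.pyGetD (xs.foldl pvIncr (List.replicate 26 (0:Int))) ((m:Nat) : Int) 0 := by
    rw [PySem.List.pyGetD_natCast, List.getD_eq_getElem _ _ (by omega)]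
  rw [hget, pvIncrFold_getD xs _ m (by rw [List.length_replicate]; omega)
      (by intro i hi; have := hx i hi; rw [List.length_replicate]; omega)]
  have hz : PySem.List.pyGetD (List.replicate 26 (0:Int)) ((m:Nat) : Int) 0 = 0 := by
    rw [PySem.List.pyGetD_natCast, List.getD_eq_getElem _ _ (by rw [List.length_replicate]; omega)]
    exact List.getElem_replicate _
  rw [hz]
  rw [List.getElem_map, List.getElem_range]
  omega

-- A's 26-array built from a character list
def pvArrOf (L : List Char) : List Int :=
  (L.map (fun c => ((c.toNat : Nat) : Int) - 97)).foldl pvIncr (List.replicate 26 (0:Int))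

theorem pvMaxArrOf (L1 L2 : List Char)
    (hlc1 : ∀ c ∈ L1, 'a' ≤ c ∧ c ≤ 'z') (hne2 : L2 ≠ []) (hlc2 : ∀ c ∈ L2, 'a' ≤ c ∧ c ≤ 'z')
    (hcnt : ∀ c, L1.count c = L2.count c) :
    PySem.List.maxD (pvArrOf L1) (fun x => x) 0
      = PySem.List.maxD ((PySem.Set.ofList L2).map (fun c => ((L2.count c : Nat) : Int))) (fun x => x) 0 := by
  unfold pvArrOf
  rw [pvArr_eq_map]
  · have hmap : (List.range 26).map (fun m => (((L1.map (fun c => ((c.toNat : Nat) : Int) - 97)).count ((m:Nat) : Int) : Nat) : Int))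
        = (List.range 26).map (fun m => ((L1.count (Char.ofNat (97+m)) : Nat) : Int)) := by
      apply List.map_congr_left
      intro m hm
      rw [List.mem_range] at hm
      have hinj : Function.Injective (fun c : Char => ((c.toNat : Nat) : Int) - 97) := by
        intro a b h
        simp at h
        have hab : a.toNat = b.toNat := by exact_mod_cast h
        apply Char.ext
        have : a.val.toNat = b.val.toNat := hab
        exact UInt32.toNat_inj.mp this
      have hval : (fun c : Char => ((c.toNat : Nat) : Int) - 97) (Char.ofNat (97+m)) = ((m:Nat) : Int) := by
        simp [pvCharOf_toNat m hm]
      rw [← hval, List.count_map_of_injective L1 _ hinj]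
    rw [hmap]
    exact pvMax_eq L1 L2 hne2 hlc2 hcnt
  · intro i hi
    rw [List.mem_map] at hi
    obtain ⟨c, hc, hv⟩ := hi
    have := hlc1 c hc
    have h1 : 97 ≤ c.toNat := this.1
    have h2 : c.toNat ≤ 122 := this.2
    omega

-- membership / nonemptiness of the tallied lists
theorem pvCol_mem (cs : List Char) (K r c0 : Nat) (hc0 : c0 < K) (c : Char)
    (h : c ∈ pvCol cs K r c0) : ∃ p, p < r*K ∧ c = pvCh cs p := by
  unfold pvCol at h
  rw [List.mem_map] at h
  obtain ⟨i, hi, hc⟩ := h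
  rw [List.mem_range] at hi
  have hb : (i+1)*K ≤ r*K := Nat.mul_le_mul_right K hi
  exact ⟨i*K+c0, by nlinarith, hc.symm⟩

theorem pvBlk_mem (cs : List Char) (K r g : Nat) (hK : 1 ≤ K) (hg : g < K) (c : Char)
    (h : c ∈ pvBlk cs K r g) : ∃ p, p < r*K ∧ c = pvCh cs p := by
  unfold pvBlk at h
  split_ifs at h
  · exact pvCol_mem cs K r g hg c h
  · rcases List.mem_append.mp h with h' | h'
    · exact pvCol_mem cs K r g hg c h'
    · exact pvCol_mem cs K r (K-1-g) (by omega) c h'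

theorem pvCol_ne_nil (cs : List Char) (K r c0 : Nat) (hr : 1 ≤ r) : pvCol cs K r c0 ≠ [] := by
  unfold pvCol
  cases r with
  | zero => omega
  | succ n => simp [List.range_succ]

theorem pvBlk_ne_nil (cs : List Char) (K r g : Nat) (hr : 1 ≤ r) : pvBlk cs K r g ≠ [] := by
  unfold pvBlk
  split_ifs
  · exact pvCol_ne_nil cs K r g hr
  · intro h
    rcases List.append_eq_nil_iff.mp h with ⟨h1, _⟩
    exact pvCol_ne_nil cs K r g hr h1

theorem pvLA_mem (cs : List Char) (K r j : Nat) (hK : 1 ≤ K) (hj : j < K) (c : Char)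
    (h : c ∈ pvLA cs K r j) : ∃ p, p < r*K ∧ c = pvCh cs p := by
  unfold pvLA at h
  rw [List.mem_flatMap] at h
  obtain ⟨i, hi, hc⟩ := h
  rw [List.mem_range] at hi
  simp at hc
  have hb : (i+1)*K ≤ r*K := Nat.mul_le_mul_right K hi
  rcases hc with hc | hc
  · exact ⟨i*K+j, by nlinarith, hc⟩
  · exact ⟨i*K+(K-1-j), by have : K-1-j < K := by omega
                           nlinarith, hc⟩

-- maximal character multiplicity of a list, as a Finset sup
def pvMcn (L : List Char) : Nat := L.toFinset.sup (fun c => L.count c)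

theorem pvMcn_append (L : List Char) (c : Char) :
    pvMcn (L ++ [c]) = max (pvMcn L) (L.count c + 1) := by
  unfold pvMcn
  have htf : (L ++ [c]).toFinset = insert c L.toFinset := by
    ext x; simp [or_comm]
  have hcnt : ∀ d, (L ++ [c]).count d = L.count d + (if d = c then 1 else 0) := by
    intro d
    rw [List.count_append]
    by_cases h : d = c
    · subst h; simp
    · have h0 : List.count d [c] = 0 := List.count_eq_zero.mpr (by simp [h])
      rw [h0, if_neg h]
  rw [htf, Finset.sup_insert]
  have h1 : (L ++ [c]).count c = L.count c + 1 := by rw [hcnt]; simp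
  have hle : L.toFinset.sup (fun d => (L ++ [c]).count d)
      ≤ max (L.toFinset.sup (fun d => L.count d)) (L.count c + 1) := by
    apply Finset.sup_le
    intro d hd
    rw [hcnt]
    by_cases h : d = c
    · subst h
      rw [if_pos rfl]
      exact Nat.le_max_right _ _
    · rw [if_neg h]
      have hds := Finset.le_sup (f := fun d => List.count d L) hd
      beta_reduce at hds
      omega
  have hge : L.toFinset.sup (fun d => L.count d)
      ≤ L.toFinset.sup (fun d => (L ++ [c]).count d) := by
    apply Finset.sup_mono_fun
    intro d _
    rw [hcnt]
    omega
  rw [h1]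
  have hj : (L.count c + 1) ⊔ L.toFinset.sup (fun d => (L ++ [c]).count d)
      = max (L.count c + 1) (L.toFinset.sup (fun d => (L ++ [c]).count d)) := rfl
  rw [hj]
  omega

theorem pvMcn_perm (L L' : List Char) (h : L.Perm L') : pvMcn L = pvMcn L' := by
  unfold pvMcn
  rw [List.toFinset_eq_of_perm _ _ h]
  apply Finset.sup_congr rfl
  intro d _
  exact h.count_eq d

-- the run scan of B's inner loop
def pvStepRun (st : Int × Int × Option Char) (c : Char) : Int × Int × Option Char :=
  let run : Int := if some c == st.2.2 then st.2.1 + 1 else 1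
  let best : Int := if run > st.1 then run else st.1
  (best, run, some c)

theorem pvScanInv (l : List Char) : ∀ (L1 : List Char) (p : Char),
    (∀ x ∈ L1, x ≤ p) → p ∈ L1 → l.Pairwise (· ≤ ·) → (∀ x ∈ l, p ≤ x) →
    ∃ q, (∀ x ∈ L1 ++ l, x ≤ q) ∧ q ∈ L1 ++ l ∧
      l.foldl pvStepRun ((pvMcn L1 : Int), ((L1.count p : Nat) : Int), some p)
        = ((pvMcn (L1 ++ l) : Int), (((L1 ++ l).count q : Nat) : Int), some q) := by
  induction l with
  | nil =>
    intro L1 p h1 h2 _ _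
    exact ⟨p, by simpa using h1, by simpa using h2, by simp⟩
  | cons c t ih =>
    intro L1 p h1 h2 hpw hge
    have hpc : p ≤ c := hge c (by simp)
    have hstep : pvStepRun ((pvMcn L1 : Int), ((L1.count p : Nat) : Int), some p) c
        = ((pvMcn (L1 ++ [c]) : Int), (((L1 ++ [c]).count c : Nat) : Int), some c) := by
      by_cases hcp : c = p
      · subst hcp
        have hc1 : (L1 ++ [c]).count c = L1.count c + 1 := by
          rw [List.count_append]; simp
        have hm : pvMcn (L1 ++ [c]) = max (pvMcn L1) (L1.count c + 1) := pvMcn_append L1 c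
        simp only [pvStepRun, beq_self_eq_true, eq_self_iff_true, if_true, hc1, hm]
        rw [Prod.mk.injEq, Prod.mk.injEq]
        refine ⟨?_, ?_, rfl⟩
        · split_ifs with h <;> push_cast <;> omega
        · push_cast
          try ring
      · have hc0 : L1.count c = 0 := by
          rw [List.count_eq_zero]
          intro hmem
          exact hcp (le_antisymm (h1 c hmem) hpc)
        have hc1 : (L1 ++ [c]).count c = 1 := by
          rw [List.count_append, hc0]; simp
        have hm : pvMcn (L1 ++ [c]) = max (pvMcn L1) 1 := by
          rw [pvMcn_append, hc0]
        have hbeq : (some c == some p) = false := by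
          simp [hcp]
        simp only [pvStepRun, hbeq, Bool.false_eq_true, if_false, hc1, hm]
        rw [Prod.mk.injEq, Prod.mk.injEq]
        refine ⟨?_, ?_, rfl⟩
        · split_ifs with h <;> push_cast <;> omega
        · push_cast
          try ring
    rw [List.foldl_cons, hstep]
    obtain ⟨q, hq1, hq2, hq3⟩ := ih (L1 ++ [c]) c
      (by intro x hx
          rcases List.mem_append.mp hx with h | h
          · exact le_trans (h1 x h) hpc
          · simp at h; exact le_of_eq h)
      (by simp)
      hpw.of_cons
      (fun x hx => (List.pairwise_cons.mp hpw).1 x hx)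
    refine ⟨q, ?_, ?_, ?_⟩
    · intro x hx
      apply hq1
      simpa [List.append_assoc] using hx
    · simpa [List.append_assoc] using hq2
    · rw [hq3]
      simp [List.append_assoc]

theorem pvScanBest (L : List Char) (h : L ≠ []) (hpw : L.Pairwise (· ≤ ·)) :
    (L.foldl pvStepRun ((0 : Int), (0 : Int), (none : Option Char))).1 = ((pvMcn L : Nat) : Int) := by
  cases L with
  | nil => exact absurd rfl h
  | cons c t =>
    have hm1 : pvMcn [c] = 1 := by
      unfold pvMcn; simp
    have hstep : pvStepRun ((0 : Int), (0 : Int), (none : Option Char)) c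
        = ((pvMcn [c] : Int), ((([c].count c : Nat)) : Int), some c) := by
      simp [pvStepRun, hm1]
    rw [List.foldl_cons, hstep]
    obtain ⟨q, hq1, hq2, hq3⟩ := pvScanInv t [c] c (by simp) (by simp)
      hpw.of_cons (fun x hx => (List.pairwise_cons.mp hpw).1 x hx)
    rw [hq3]
    simp

-- the per-group maximum that both programs compute
def pvM (cs : List Char) (K r g : Nat) : Int :=
  PySem.List.maxD ((PySem.Set.ofList (pvBlk cs K r g)).map
    (fun c => (((pvBlk cs K r g).count c : Nat) : Int))) (fun x => x) 0

theorem pvMcn_eq_maxD (L : List Char) (h : L ≠ []) :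
    ((pvMcn L : Nat) : Int)
      = PySem.List.maxD ((PySem.Set.ofList L).map (fun c => ((L.count c : Nat) : Int))) (fun x => x) 0 := by
  obtain ⟨c0, hc0⟩ : ∃ c0, c0 ∈ L := by
    cases L with
    | nil => exact absurd rfl h
    | cons a t => exact ⟨a, by simp⟩
  set xs := (PySem.Set.ofList L).map (fun c => ((L.count c : Nat) : Int)) with hxs
  have hxne : xs ≠ [] := by
    simp [hxs]
    intro hemp
    have : c0 ∈ PySem.Set.ofList L := (PySem.Set.mem_ofList L c0).mpr hc0
    rw [hemp] at this
    simp at this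
  rcases hmx : PySem.List.max? xs (fun x => x) with _ | m
  · exact absurd ((PySem.List.max?_eq_none_iff xs _).mp hmx) hxne
  have hmem := PySem.List.max?_mem hmx
  rw [hxs] at hmem
  rw [List.mem_map] at hmem
  obtain ⟨c, hcS, hcv⟩ := hmem
  have hcL : c ∈ L := (PySem.Set.mem_ofList L c).mp hcS
  have hup : m ≤ (pvMcn L : Int) := by
    rw [← hcv]
    have : L.count c ≤ pvMcn L := by
      unfold pvMcn; exact Finset.le_sup (f := fun c => List.count c L) (List.mem_toFinset.mpr hcL)
    exact_mod_cast this
  obtain ⟨d, hd, hsup⟩ := Finset.exists_mem_eq_sup L.toFinset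
    ⟨c, List.mem_toFinset.mpr hcL⟩ (fun c => L.count c)
  have hdn : ((L.count d : Nat) : Int) ∈ xs := by
    rw [hxs, List.mem_map]
    exact ⟨d, (PySem.Set.mem_ofList L d).mpr (List.mem_toFinset.mp hd), rfl⟩
  have hlo : (pvMcn L : Int) ≤ m := by
    have hle := PySem.List.max?_isMax hmx _ hdn
    unfold pvMcn
    rw [hsup]
    have := hle
    exact_mod_cast this
  simp [PySem.List.maxD, hmx]
  omega

-- the port's column comprehension is pvCol
theorem pvColPort (cs : List Char) (K r c0 : Nat) :
    (PySem.List.pyRange 0 ((r:Nat) : Int)).map (fun i => PySem.List.pyGetD cs (i*((K:Nat):Int)+((c0:Nat):Int)) 'a')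
      = pvCol cs K r c0 := by
  rw [PySem.List.pyRange_zero_natCast, List.map_map]
  apply List.map_congr_left
  intro i _
  have hcast : ((i:Nat):Int)*((K:Nat):Int)+((c0:Nat):Int) = ((i*K+c0 : Nat) : Int) := by push_cast; ring
  simp only [Function.comp_apply]
  rw [hcast, PySem.List.pyGetD_natCast]
  rfl

theorem pvColPort2 (cs : List Char) (K r gn : Nat) (h : gn + 1 ≤ K) :
    (PySem.List.pyRange 0 ((r:Nat) : Int)).map (fun i => PySem.List.pyGetD cs (i*((K:Nat):Int)+((K:Nat):Int)-1-((gn:Nat):Int)) 'a')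
      = pvCol cs K r (K-1-gn) := by
  rw [PySem.List.pyRange_zero_natCast, List.map_map]
  apply List.map_congr_left
  intro i _
  have hcast : ((i:Nat):Int)*((K:Nat):Int)+((K:Nat):Int)-1-((gn:Nat):Int) = ((i*K+(K-1-gn) : Nat) : Int) := by
    push_cast; omega
  simp only [Function.comp_apply]
  rw [hcast, PySem.List.pyGetD_natCast]
  rfl

-- B = r*k - sum of per-group maxima
theorem pvAlt_eq (s : String) (K r : Nat) (hK : 1 ≤ K) (hr : 1 ≤ r)
    (hrdef : r = s.toList.length / K) :
    solve_alt s (K : Int) = ((r*K : Nat) : Int) - ∑ g ∈ Finset.range ((K+1)/2), pvM s.toList K r g := by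
  simp only [solve_alt]
  have hflo : PySem.Int.floordiv (PySem.List.len s.toList) (K : Int) = ((r:Nat) : Int) := by
    have : PySem.List.len s.toList = ((s.toList.length : Nat) : Int) := by
      simp [PySem.List.len]
    rw [this, PySem.Int.floordiv_natCast, hrdef]
  have hflo2 : PySem.Int.floordiv ((K:Int)+1) 2 = (((K+1)/2 : Nat) : Int) := by
    have h1 : ((K:Int)+1) = ((K+1 : Nat) : Int) := by push_cast; ring
    rw [h1]
    exact_mod_cast PySem.Int.floordiv_natCast (K+1) 2
  rw [hflo, hflo2, PySem.List.pyRange_zero_natCast ((K+1)/2), List.foldl_map]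
  have hbody : ∀ (acc : Int) (gn : Nat), gn ∈ List.range ((K+1)/2) →
      (fun (res : Int) (g : Int) =>
        res - ((PySem.List.sorted
            (if g ≠ (K:Int) - 1 - g then
              ((PySem.List.pyRange 0 ((r:Nat):Int)).map (fun i => PySem.List.pyGetD s.toList (i*(K:Int)+g) 'a'))
                ++ (PySem.List.pyRange 0 ((r:Nat):Int)).map (fun i => PySem.List.pyGetD s.toList (i*(K:Int)+(K:Int)-1-g) 'a')
            else ((PySem.List.pyRange 0 ((r:Nat):Int)).map (fun i => PySem.List.pyGetD s.toList (i*(K:Int)+g) 'a')))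
            (fun c => c) false).foldl pvStepRun ((0:Int), (0:Int), (none : Option Char))).1)
        acc ((gn : Nat) : Int)
      = acc + (-(pvM s.toList K r gn)) := by
    intro acc gn hmem
    rw [List.mem_range] at hmem
    have hgnK : gn + 1 ≤ K := by omega
    have hblk : (if ((gn:Nat):Int) ≠ (K:Int) - 1 - ((gn:Nat):Int) then
              ((PySem.List.pyRange 0 ((r:Nat):Int)).map (fun i => PySem.List.pyGetD s.toList (i*(K:Int)+((gn:Nat):Int)) 'a'))
                ++ (PySem.List.pyRange 0 ((r:Nat):Int)).map (fun i => PySem.List.pyGetD s.toList (i*(K:Int)+(K:Int)-1-((gn:Nat):Int)) 'a')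
            else ((PySem.List.pyRange 0 ((r:Nat):Int)).map (fun i => PySem.List.pyGetD s.toList (i*(K:Int)+((gn:Nat):Int)) 'a')))
        = pvBlk s.toList K r gn := by
      rw [pvColPort s.toList K r gn, pvColPort2 s.toList K r gn hgnK]
      unfold pvBlk
      by_cases hc : gn = K - 1 - gn
      · rw [if_pos hc, if_neg (by push_cast; omega)]
      · rw [if_neg hc, if_pos (by push_cast; omega)]
    simp only [hblk]
    have hbne : pvBlk s.toList K r gn ≠ [] := pvBlk_ne_nil s.toList K r gn hr
    have hsne : PySem.List.sorted (pvBlk s.toList K r gn) (fun c => c) false ≠ [] := by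
      intro h
      exact hbne ((PySem.List.sorted_eq_nil_iff _ _ _).mp h)
    have hperm : (PySem.List.sorted (pvBlk s.toList K r gn) (fun c => c) false).Perm (pvBlk s.toList K r gn) :=
      PySem.List.sorted_perm _ _ _
    have hpw : (PySem.List.sorted (pvBlk s.toList K r gn) (fun c => c) false).Pairwise (· ≤ ·) :=
      PySem.List.sorted_pairwise _ _
    rw [pvScanBest _ hsne hpw, pvMcn_perm _ _ hperm, pvMcn_eq_maxD _ hbne]
    have : PySem.List.maxD ((PySem.Set.ofList (pvBlk s.toList K r gn)).map
        (fun c => (((pvBlk s.toList K r gn).count c : Nat) : Int))) (fun x => x) 0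
        = pvM s.toList K r gn := rfl
    rw [this]
    ring
  refine Eq.trans (PySem.List.foldl_congr_mem _ _
    (fun (res : Int) (gn : Nat) => res + (-(pvM s.toList K r gn))) _ hbody) ?_
  rw [PySem.List.foldl_add, pvSum_range_int]
  have hmul : ((r:Nat):Int) * ((K:Nat):Int) = ((r*K : Nat) : Int) := by push_cast; ring
  rw [hmul]
  simp
  ring

-- A-side: the two inner loops, as pvArrOf of the tallied lists
theorem pvInner_pair (s : String) (K r jn : Nat) (hK : 1 ≤ K) (hj : jn < K/2) :
    List.foldl
      (fun d i =>
        PySem.List.pySetD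
          (PySem.List.pySetD d (((PySem.List.pyGetD s.toList (i * (K:Int) + (jn:Int)) 'a').toNat : Int) - 97)
            (PySem.List.pyGetD d (((PySem.List.pyGetD s.toList (i * (K:Int) + (jn:Int)) 'a').toNat : Int) - 97) 0 + 1))
          (((PySem.List.pyGetD s.toList (i * (K:Int) + (K:Int) - 1 - (jn:Int)) 'a').toNat : Int) - 97)
          (PySem.List.pyGetD
              (PySem.List.pySetD d (((PySem.List.pyGetD s.toList (i * (K:Int) + (jn:Int)) 'a').toNat : Int) - 97)
                (PySem.List.pyGetD d (((PySem.List.pyGetD s.toList (i * (K:Int) + (jn:Int)) 'a').toNat : Int) - 97) 0 + 1))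
              (((PySem.List.pyGetD s.toList (i * (K:Int) + (K:Int) - 1 - (jn:Int)) 'a').toNat : Int) - 97) 0 + 1))
      (PySem.List.pyRepeat [0] 26) (PySem.List.pyRange 0 (r:Int))
    = pvArrOf (pvLA s.toList K r jn) := by
  rw [PySem.List.pyRange_zero_natCast, List.foldl_map]
  refine Eq.trans (PySem.List.foldl_congr_mem _ _
    (fun (d : List Int) (iN : Nat) => pvIncr (pvIncr d (((pvCh s.toList (iN*K+jn)).toNat : Int) - 97))
      (((pvCh s.toList (iN*K+(K-1-jn))).toNat : Int) - 97)) _ ?_) ?_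
  · intro acc iN _
    have e1 : (iN : Int) * (K:Int) + (jn:Int) = ((iN*K+jn : Nat) : Int) := by push_cast; ring
    have e2 : (iN : Int) * (K:Int) + (K:Int) - 1 - (jn:Int) = ((iN*K+(K-1-jn) : Nat) : Int) := by
      have : jn + 1 ≤ K := by omega
      push_cast
      omega
    beta_reduce
    rw [e1, e2, PySem.List.pyGetD_natCast, PySem.List.pyGetD_natCast]
    rfl
  rw [pvFoldDouble]
  have hflat : (List.range r).flatMap
      (fun iN => [(((pvCh s.toList (iN*K+jn)).toNat : Int) - 97), (((pvCh s.toList (iN*K+(K-1-jn))).toNat : Int) - 97)])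
      = (pvLA s.toList K r jn).map (fun c => ((c.toNat : Nat) : Int) - 97) := by
    unfold pvLA
    rw [List.map_flatMap]
    rfl
  rw [hflat]
  have hinit : PySem.List.pyRepeat [(0:Int)] 26 = List.replicate 26 (0:Int) := by
    rw [PySem.List.pyRepeat_singleton]
    rfl
  rw [hinit]
  rfl

theorem pvInner_mid (s : String) (K r : Nat) (hK : 1 ≤ K) :
    List.foldl
      (fun d i =>
        PySem.List.pySetD d (((PySem.List.pyGetD s.toList (i * (K:Int) + ((K/2 : Nat):Int)) 'a').toNat : Int) - 97)
          (PySem.List.pyGetD d (((PySem.List.pyGetD s.toList (i * (K:Int) + ((K/2 : Nat):Int)) 'a').toNat : Int) - 97) 0 + 1))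
      (PySem.List.pyRepeat [0] 26) (PySem.List.pyRange 0 (r:Int))
    = pvArrOf (pvLM s.toList K r) := by
  rw [PySem.List.pyRange_zero_natCast, List.foldl_map]
  refine Eq.trans (PySem.List.foldl_congr_mem _ _
    (fun (d : List Int) (iN : Nat) => pvIncr d (((pvCh s.toList (iN*K + K/2)).toNat : Int) - 97)) _ ?_) ?_
  · intro acc iN _
    have e1 : (iN : Int) * (K:Int) + ((K/2 : Nat):Int) = ((iN*K+K/2 : Nat) : Int) := by push_cast; ring
    beta_reduce
    rw [e1, PySem.List.pyGetD_natCast]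
    rfl
  have hmm : (List.range r).foldl (fun d iN => pvIncr d (((pvCh s.toList (iN*K + K/2)).toNat : Int) - 97)) (PySem.List.pyRepeat [(0:Int)] 26)
      = ((List.range r).map (fun iN => (((pvCh s.toList (iN*K + K/2)).toNat : Nat) : Int) - 97)).foldl pvIncr (PySem.List.pyRepeat [(0:Int)] 26) := by
    rw [List.foldl_map]
  rw [hmm]
  have hinit : PySem.List.pyRepeat [(0:Int)] 26 = List.replicate 26 (0:Int) := by
    rw [PySem.List.pyRepeat_singleton]
    rfl
  rw [hinit]
  unfold pvArrOf pvLM pvCol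
  rw [List.map_map]
  rfl

theorem pvA_eq (s : String) (K r : Nat) (hK : 1 ≤ K) (hr : 1 ≤ r)
    (hrdef : r = s.toList.length / K)
    (hlow : ∀ p, p < r*K → 'a' ≤ pvCh s.toList p ∧ pvCh s.toList p ≤ 'z') :
    solve s (K : Int) = ((r*K : Nat) : Int) - ∑ g ∈ Finset.range ((K+1)/2), pvM s.toList K r g := by
  simp only [solve]
  have hflo : PySem.Int.floordiv (PySem.List.len s.toList) (K : Int) = ((r:Nat) : Int) := by
    have : PySem.List.len s.toList = ((s.toList.length : Nat) : Int) := by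
      simp [PySem.List.len]
    rw [this, PySem.Int.floordiv_natCast, hrdef]
  have hflo2 : PySem.Int.floordiv (K : Int) 2 = ((K/2 : Nat) : Int) := by
    exact_mod_cast PySem.Int.floordiv_natCast K 2
  have hmod2 : PySem.Int.mod (K : Int) 2 = ((K % 2 : Nat) : Int) := by
    exact_mod_cast PySem.Int.mod_natCast K 2
  rw [hflo, hflo2, hmod2]
  have hMpair : ∀ jn : Nat, jn < K/2 →
      PySem.List.maxD (pvArrOf (pvLA s.toList K r jn)) (fun x => x) 0 = pvM s.toList K r jn := by
    intro jn hj
    have hne : jn ≠ K-1-jn := by omega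
    unfold pvM
    apply pvMaxArrOf
    · intro c hc
      obtain ⟨p, hp, hcp⟩ := pvLA_mem s.toList K r jn hK (by omega) c hc
      rw [hcp]
      exact hlow p hp
    · exact pvBlk_ne_nil s.toList K r jn hr
    · intro c hc
      obtain ⟨p, hp, hcp⟩ := pvBlk_mem s.toList K r jn hK (by omega) c hc
      rw [hcp]
      exact hlow p hp
    · exact fun c => (pvCount_blk_pair s.toList K r jn hne c).symm
  have houter : List.foldl
      (fun (res : Int) (j : Int) =>
        res + (2 * ((r:Nat):Int) - PySem.List.maxD
          (List.foldl
            (fun d i =>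
              PySem.List.pySetD
                (PySem.List.pySetD d (((PySem.List.pyGetD s.toList (i * (K:Int) + j) 'a').toNat : Int) - 97)
                  (PySem.List.pyGetD d (((PySem.List.pyGetD s.toList (i * (K:Int) + j) 'a').toNat : Int) - 97) 0 + 1))
                (((PySem.List.pyGetD s.toList (i * (K:Int) + (K:Int) - 1 - j) 'a').toNat : Int) - 97)
                (PySem.List.pyGetD
                    (PySem.List.pySetD d (((PySem.List.pyGetD s.toList (i * (K:Int) + j) 'a').toNat : Int) - 97)
                      (PySem.List.pyGetD d (((PySem.List.pyGetD s.toList (i * (K:Int) + j) 'a').toNat : Int) - 97) 0 + 1))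
                    (((PySem.List.pyGetD s.toList (i * (K:Int) + (K:Int) - 1 - j) 'a').toNat : Int) - 97) 0 + 1))
            (PySem.List.pyRepeat [0] 26) (PySem.List.pyRange 0 ((r:Nat):Int)))
          (fun x => x) 0))
      0 (PySem.List.pyRange 0 ((K/2 : Nat) : Int))
      = ∑ j ∈ Finset.range (K/2), (2 * ((r:Nat):Int) - pvM s.toList K r j) := by
    rw [PySem.List.pyRange_zero_natCast (K/2), List.foldl_map]
    refine Eq.trans (PySem.List.foldl_congr_mem _ _
      (fun (res : Int) (jn : Nat) => res + (2 * ((r:Nat):Int) - pvM s.toList K r jn)) _ ?_) ?_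
    · intro acc jn hmem
      rw [List.mem_range] at hmem
      beta_reduce
      rw [pvInner_pair s K r jn hK hmem, hMpair jn hmem]
    · rw [PySem.List.foldl_add, pvSum_range_int]
      simp
  rw [houter]
  by_cases hodd : K % 2 = 1
  · rw [if_pos (by exact_mod_cast congrArg (Nat.cast : Nat → Int) hodd)]
    rw [pvInner_mid s K r hK]
    have hmid : pvBlk s.toList K r (K/2) = pvLM s.toList K r := by
      unfold pvBlk
      rw [if_pos (by omega)]
      rfl
    have hMmid : PySem.List.maxD (pvArrOf (pvLM s.toList K r)) (fun x => x) 0 = pvM s.toList K r (K/2) := by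
      unfold pvM
      apply pvMaxArrOf
      · intro c hc
        obtain ⟨p, hp, hcp⟩ := pvCol_mem s.toList K r (K/2) (by omega) c hc
        rw [hcp]
        exact hlow p hp
      · exact pvBlk_ne_nil s.toList K r (K/2) hr
      · intro c hc
        obtain ⟨p, hp, hcp⟩ := pvBlk_mem s.toList K r (K/2) hK (by omega) c hc
        rw [hcp]
        exact hlow p hp
      · intro c
        rw [hmid]
    rw [hMmid]
    have hsucc : (K+1)/2 = K/2 + 1 := by omega
    rw [hsucc, Finset.sum_range_succ, Finset.sum_sub_distrib, Finset.sum_const, Finset.card_range]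
    have hrk : ((r*K : Nat) : Int) = (K/2 : Nat) • (2 * ((r:Nat):Int)) + ((r:Nat):Int) := by
      obtain ⟨q, hq⟩ : ∃ q, K = 2*q + 1 := ⟨K/2, by omega⟩
      rw [hq]
      have : (2*q+1)/2 = q := by omega
      rw [this]
      push_cast
      ring
    rw [hrk]
    ring
  · rw [if_neg (by
      intro hcontra
      have : K % 2 = 1 := by exact_mod_cast hcontra
      exact hodd this)]
    have heq : (K+1)/2 = K/2 := by omega
    rw [heq, Finset.sum_sub_distrib, Finset.sum_const, Finset.card_range]
    have hrk : ((r*K : Nat) : Int) = (K/2 : Nat) • (2 * ((r:Nat):Int)) := by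
      obtain ⟨q, hq⟩ : ∃ q, K = 2*q := ⟨K/2, by omega⟩
      rw [hq]
      have : (2*q)/2 = q := by omega
      rw [this]
      push_cast
      ring
    rw [hrk]

theorem pvMaxD_zeros : PySem.List.maxD (PySem.List.pyRepeat [(0:Int)] 26) (fun x => x) 0 = 0 := by decide

theorem pvA_zero (s : String) (K : Nat) (hK : 1 ≤ K) (h0 : s.toList.length / K = 0) :
    solve s (K : Int) = 0 := by
  simp only [solve]
  have hflo : PySem.Int.floordiv (PySem.List.len s.toList) (K : Int) = ((0:Nat) : Int) := by
    have : PySem.List.len s.toList = ((s.toList.length : Nat) : Int) := by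
      simp [PySem.List.len]
    rw [this, PySem.Int.floordiv_natCast, h0]
  rw [hflo]
  have hnil : PySem.List.pyRange 0 (((0:Nat)) : Int) = [] := by decide
  rw [hnil]
  have houter : ∀ (l : List Int) (init : Int), List.foldl
      (fun (res : Int) (j : Int) =>
        res + (2 * (((0:Nat)):Int) - PySem.List.maxD (List.foldl
          (fun d i =>
              PySem.List.pySetD
                (PySem.List.pySetD d (((PySem.List.pyGetD s.toList (i * (K:Int) + j) 'a').toNat : Int) - 97)
                  (PySem.List.pyGetD d (((PySem.List.pyGetD s.toList (i * (K:Int) + j) 'a').toNat : Int) - 97) 0 + 1))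
                (((PySem.List.pyGetD s.toList (i * (K:Int) + (K:Int) - 1 - j) 'a').toNat : Int) - 97)
                (PySem.List.pyGetD
                    (PySem.List.pySetD d (((PySem.List.pyGetD s.toList (i * (K:Int) + j) 'a').toNat : Int) - 97)
                      (PySem.List.pyGetD d (((PySem.List.pyGetD s.toList (i * (K:Int) + j) 'a').toNat : Int) - 97) 0 + 1))
                    (((PySem.List.pyGetD s.toList (i * (K:Int) + (K:Int) - 1 - j) 'a').toNat : Int) - 97) 0 + 1))
          (PySem.List.pyRepeat [0] 26) []) (fun x => x) 0))
      init l = init := by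
    intro l init
    refine Eq.trans (PySem.List.foldl_congr_mem _ _ (fun (res : Int) (_ : Int) => res) _ ?_) (PySem.List.foldl_ignore _ _)
    intro acc x _
    beta_reduce
    rw [List.foldl_nil, pvMaxD_zeros]
    push_cast
    ring
  rw [houter]
  split_ifs with hcond
  · rw [List.foldl_nil, pvMaxD_zeros]
    push_cast
  · rfl

theorem pvAlt_zero (s : String) (K : Nat) (hK : 1 ≤ K) (h0 : s.toList.length / K = 0) :
    solve_alt s (K : Int) = 0 := by
  simp only [solve_alt]
  have hflo : PySem.Int.floordiv (PySem.List.len s.toList) (K : Int) = ((0:Nat) : Int) := by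
    have : PySem.List.len s.toList = ((s.toList.length : Nat) : Int) := by
      simp [PySem.List.len]
    rw [this, PySem.Int.floordiv_natCast, h0]
  rw [hflo]
  have hnil : PySem.List.pyRange 0 (((0:Nat)) : Int) = [] := by decide
  rw [hnil]
  have hbody : ∀ (l : List Int) (init : Int), List.foldl
      (fun (res : Int) (g : Int) =>
        res - ((PySem.List.sorted
            (if g ≠ (K:Int) - 1 - g then
              (([] : List Int).map (fun i => PySem.List.pyGetD s.toList (i*(K:Int)+g) 'a'))
                ++ ([] : List Int).map (fun i => PySem.List.pyGetD s.toList (i*(K:Int)+(K:Int)-1-g) 'a')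
            else (([] : List Int).map (fun i => PySem.List.pyGetD s.toList (i*(K:Int)+g) 'a')))
            (fun c => c) false).foldl pvStepRun ((0:Int), (0:Int), (none : Option Char))).1)
      init l = init := by
    intro l init
    refine Eq.trans (PySem.List.foldl_congr_mem _ _ (fun (res : Int) (_ : Int) => res) _ ?_) (PySem.List.foldl_ignore _ _)
    intro acc g _
    have hempty : (if g ≠ (K:Int) - 1 - g then
              (([] : List Int).map (fun i => PySem.List.pyGetD s.toList (i*(K:Int)+g) 'a'))
                ++ ([] : List Int).map (fun i => PySem.List.pyGetD s.toList (i*(K:Int)+(K:Int)-1-g) 'a')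
            else (([] : List Int).map (fun i => PySem.List.pyGetD s.toList (i*(K:Int)+g) 'a'))) = ([] : List Char) := by
      split_ifs <;> simp
    beta_reduce
    rw [hempty]
    rw [show (PySem.List.sorted ([] : List Char) (fun c => c) false) = [] from rfl, List.foldl_nil]
    norm_num
  refine Eq.trans (hbody (PySem.List.pyRange 0 (PySem.Int.floordiv ((K:Int)+1) 2)) (((0:Nat):Int) * (K:Int))) ?_
  norm_num

theorem pvMainK (s : String) (K : Nat) (hK : 1 ≤ K)
    (hpre : ∀ c ∈ s.toList.take (s.toList.length / K * K), 'a' ≤ c ∧ c ≤ 'z') :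
    solve s ((K : Nat) : Int) = solve_alt s ((K : Nat) : Int) := by
  by_cases hr0 : s.toList.length / K = 0
  · rw [pvA_zero s K hK hr0, pvAlt_zero s K hK hr0]
  · have hr1 : 1 ≤ s.toList.length / K := Nat.one_le_iff_ne_zero.mpr hr0
    have hlow : ∀ p, p < (s.toList.length / K)*K → 'a' ≤ pvCh s.toList p ∧ pvCh s.toList p ≤ 'z' := by
      intro p hp
      have hple : (s.toList.length / K)*K ≤ s.toList.length := Nat.div_mul_le_self _ _
      have hp' : p < s.toList.length := by omega
      have hch : pvCh s.toList p = s.toList[p] := by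
        unfold pvCh
        exact List.getD_eq_getElem _ _ hp'
      have htake : s.toList[p] ∈ s.toList.take ((s.toList.length / K)*K) := by
        have h2 : (s.toList.take ((s.toList.length / K)*K))[p]'(by rw [List.length_take]; omega) = s.toList[p] := by
          rw [List.getElem_take]
        rw [← h2]
        exact List.getElem_mem _
      rw [hch]
      exact hpre _ htake
    exact (pvA_eq s K _ hK hr1 rfl hlow).trans (pvAlt_eq s K _ hK hr1 rfl).symm

theorem pvMain (s : String) (k : Int) (hk : 1 ≤ k)
    (hpre : ∀ c ∈ s.toList.take (s.toList.length / k.toNat * k.toNat), 'a' ≤ c ∧ c ≤ 'z') :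
    solve s k = solve_alt s k := by
  have hkK : k = ((k.toNat : Nat) : Int) := by omega
  rw [hkK]
  exact pvMainK s k.toNat (by omega) hpre

-- ===== VERDICT (by name: the statement is the Claim_ definition above) =====
theorem solve_spec : Claim_equal_solve := by
  intro s k _ hpre
  unfold Spec_solve
  refine pvMain s k hpre.1 ?_
  intro c hc
  have h := List.all_eq_true.mp hpre.2 c hc
  simp at h
  exact ⟨h.1, h.2⟩
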